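-- pv_equiv track=rewrite | github.com/kaushik-gopu1998/kG_Project | main.py | get_canvas_id_and_title
-- ===== SOURCE A (Python) =====
-- def get_canvas_id_and_title(val):
--     split = list(val.split(':'))
--     id = split.pop()
--     title = str()
--     for t in split:
--         title = title + t + '_'
--     title = title[:-1]
--     id = id[1:]
--     id = id[:-1]
--     return id, title
-- ===== SOURCE B (Python) =====
-- def get_canvas_id_and_title(val):
--     head, _, last = val.rpartition(':')
--     return last[1:-1], head.replace(':', '_')
-- ===== Notes on version B (the rewrite author's own statement) =====
-- stated objective: idiomatic
-- what changed: Replaces split-into-list + pop + manual join-with-underscore loop + trailing-char trim by a single rpartition splitting off the id segment, a direct [1:-1] slice for the id, and str.replace for the title.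
import Mathlib
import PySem

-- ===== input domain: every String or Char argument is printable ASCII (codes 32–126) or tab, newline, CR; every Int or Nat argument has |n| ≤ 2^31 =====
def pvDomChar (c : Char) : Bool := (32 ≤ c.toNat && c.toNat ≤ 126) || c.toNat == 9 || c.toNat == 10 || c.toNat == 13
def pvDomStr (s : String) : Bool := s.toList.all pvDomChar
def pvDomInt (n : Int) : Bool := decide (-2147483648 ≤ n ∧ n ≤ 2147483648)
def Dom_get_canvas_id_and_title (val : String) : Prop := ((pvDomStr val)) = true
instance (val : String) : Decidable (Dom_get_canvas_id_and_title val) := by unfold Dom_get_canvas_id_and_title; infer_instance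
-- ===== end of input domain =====

-- B replaces A's split/pop/manual-join parsing by one rpartition plus a [1:-1] slice and str.replace (idiomatic; same O(n) cost).

-- ===== PORT A =====
-- ports work on the code-point lists (PySem.Chars = Python str semantics)
def get_canvas_id_and_title (val : String) : String × String :=
  let split := PySem.Chars.splitOn val.toList [':']          -- val.split(':'), sep nonempty so exact
  match PySem.List.pop? split with                           -- split.pop(); split(':') is never empty, so it cannot raise
  | none => ("", "")                                         -- unreachable
  | some (id, split) =>
    let title := split.foldl (fun title t => title ++ t ++ ['_']) ([] : List Char)
    let title := PySem.Chars.slice title none (some (-1))    -- title[:-1]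
    let id := PySem.Chars.slice id (some 1) none             -- id[1:]
    let id := PySem.Chars.slice id none (some (-1))          -- id[:-1]
    (String.ofList id, String.ofList title)

-- ===== PORT B =====
-- val.rpartition(':') for the one-char separator ':', hand-ported (exact):
-- scan from the right for the last ':'; ('', '', val) when there is none.
def pvRPartColon (s : List Char) : List Char × List Char :=
  let lastRev := s.reverse.takeWhile (fun c => c ≠ ':')
  if lastRev.length = s.length then ([], s)
  else (s.take (s.length - lastRev.length - 1), lastRev.reverse)

def get_canvas_id_and_title_alt (val : String) : String × String :=
  let p := pvRPartColon val.toList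
  let id := PySem.Chars.slice p.2 (some 1) (some (-1))       -- last[1:-1]
  (String.ofList id, String.ofList (PySem.Chars.replace p.1 [':'] ['_']))

-- ===== PRECONDITION & SPEC =====
def Spec_get_canvas_id_and_title (val : String) (out : String × String) : Prop := out = get_canvas_id_and_title_alt val
instance (val : String) (out : String × String) : Decidable (Spec_get_canvas_id_and_title val out) := by unfold Spec_get_canvas_id_and_title; infer_instance

-- ===== CLAIM (what is proved, stated in full; the proofs are below) =====
def Claim_equal_get_canvas_id_and_title : Prop := ∀ (val : String), Dom_get_canvas_id_and_title val → Spec_get_canvas_id_and_title val (get_canvas_id_and_title val)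

-- ===== LEMMAS AND PROOFS =====

-- structural model of str.split(':') on code points
def pvPrep (p : List Char) : List (List Char) → List (List Char)
  | [] => [p]
  | x :: xs => (p ++ x) :: xs

def pvSplits : List Char → List (List Char)
  | [] => [[]]
  | c :: t => if c = ':' then [] :: pvSplits t else pvPrep [c] (pvSplits t)

-- join with '_' between the pieces
def pvJoinU : List (List Char) → List Char
  | [] => []
  | [p] => p
  | p :: q :: r => p ++ '_' :: pvJoinU (q :: r)

theorem pvSplits_ne_nil (s : List Char) : pvSplits s ≠ [] := by
  cases s with
  | nil => simp [pvSplits]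
  | cons c t =>
    simp only [pvSplits]
    split
    · simp
    · cases h : pvSplits t <;> simp [pvPrep]

theorem pvPrep_append (p : List Char) (xs ys : List (List Char)) (h : xs ≠ []) :
    pvPrep p (xs ++ ys) = pvPrep p xs ++ ys := by
  cases xs with
  | nil => exact absurd rfl h
  | cons x xs => simp [pvPrep]

theorem splitOn_go_eq (l : List Char) : ∀ (fuel : Nat) (cur : List Char) (acc : List (List Char)),
    l.length ≤ fuel →
    PySem.Chars.splitOn.go [':'] fuel l cur acc = acc.reverse ++ pvPrep cur.reverse (pvSplits l) := by
  induction l with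
  | nil =>
    intro fuel cur acc _
    cases fuel <;> simp [PySem.Chars.splitOn.go, pvSplits, pvPrep]
  | cons c t ih =>
    intro fuel cur acc hf
    cases fuel with
    | zero => simp at hf
    | succ f =>
      simp only [List.length_cons] at hf
      by_cases hc : c = ':'
      · subst hc
        rw [show PySem.Chars.splitOn.go [':'] (f+1) (':' :: t) cur acc
              = PySem.Chars.splitOn.go [':'] f t [] (cur.reverse :: acc) by
            simp [PySem.Chars.splitOn.go, List.isPrefixOf]]
        rw [ih f [] (cur.reverse :: acc) (by omega)]
        simp only [pvSplits]
        cases h : pvSplits t with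
        | nil => exact absurd h (pvSplits_ne_nil t)
        | cons x xs => simp [pvPrep]
      · rw [show PySem.Chars.splitOn.go [':'] (f+1) (c :: t) cur acc
              = PySem.Chars.splitOn.go [':'] f t (c :: cur) acc by
            simp [PySem.Chars.splitOn.go, List.isPrefixOf]
            intro h; exact absurd h.symm hc]
        rw [ih f (c :: cur) acc (by omega)]
        simp only [pvSplits, hc]
        cases h : pvSplits t with
        | nil => exact absurd h (pvSplits_ne_nil t)
        | cons x xs => simp [pvPrep]

theorem splitOn_eq (s : List Char) : PySem.Chars.splitOn s [':'] = pvSplits s := by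
  unfold PySem.Chars.splitOn
  rw [splitOn_go_eq s (s.length + 1) [] [] (by omega)]
  simp
  cases h : pvSplits s with
  | nil => exact absurd h (pvSplits_ne_nil s)
  | cons x xs => simp [pvPrep]

def pvSub (c : Char) : Char := if c = ':' then '_' else c

theorem replace_go_eq (l : List Char) : ∀ (fuel : Nat) (acc : List Char),
    l.length ≤ fuel →
    PySem.Chars.replace.go [':'] ['_'] fuel l acc = acc.reverse ++ l.map pvSub := by
  induction l with
  | nil => intro fuel acc _; cases fuel <;> simp [PySem.Chars.replace.go]
  | cons c t ih =>
    intro fuel acc hf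
    cases fuel with
    | zero => simp at hf
    | succ f =>
      simp only [List.length_cons] at hf
      by_cases hc : c = ':'
      · subst hc
        rw [show PySem.Chars.replace.go [':'] ['_'] (f+1) (':' :: t) acc
              = PySem.Chars.replace.go [':'] ['_'] f t ('_' :: acc) by
            simp [PySem.Chars.replace.go, List.isPrefixOf]]
        rw [ih f ('_' :: acc) (by omega)]
        simp [pvSub]
      · rw [show PySem.Chars.replace.go [':'] ['_'] (f+1) (c :: t) acc
              = PySem.Chars.replace.go [':'] ['_'] f t (c :: acc) by
            simp [PySem.Chars.replace.go, List.isPrefixOf]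
            intro h; exact absurd h.symm hc]
        rw [ih f (c :: acc) (by omega)]
        simp [pvSub, hc]

theorem replace_eq (s : List Char) : PySem.Chars.replace s [':'] ['_'] = s.map pvSub := by
  unfold PySem.Chars.replace
  simp [List.isEmpty]
  exact replace_go_eq s s.length [] le_rfl

theorem map_sub_eq_joinU (s : List Char) : s.map pvSub = pvJoinU (pvSplits s) := by
  induction s with
  | nil => simp [pvSplits, pvJoinU]
  | cons c t ih =>
    by_cases hc : c = ':'
    · subst hc
      simp only [List.map_cons, pvSplits]
      cases h : pvSplits t with
      | nil => exact absurd h (pvSplits_ne_nil t)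
      | cons x xs =>
        simp [pvJoinU, pvSub, ih, h]
    · simp only [List.map_cons, pvSplits, hc]
      cases h : pvSplits t with
      | nil => exact absurd h (pvSplits_ne_nil t)
      | cons x xs =>
        rw [h] at ih
        cases xs with
        | nil => simp [pvPrep, pvJoinU, pvSub, hc, ih]
        | cons y ys => simp [pvPrep, pvJoinU, pvSub, hc, ih]

theorem splits_append_colon (xs ys : List Char) :
    pvSplits (xs ++ ':' :: ys) = pvSplits xs ++ pvSplits ys := by
  induction xs with
  | nil => simp [pvSplits]
  | cons c t ih =>
    by_cases hc : c = ':'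
    · subst hc; simp [pvSplits, ih]
    · simp only [List.cons_append, pvSplits, hc, ih]
      exact pvPrep_append [c] _ _ (pvSplits_ne_nil t)

theorem splits_no_colon (ys : List Char) (h : ':' ∉ ys) : pvSplits ys = [ys] := by
  induction ys with
  | nil => simp [pvSplits]
  | cons c t ih =>
    simp only [List.mem_cons, not_or] at h
    have hcne : ¬ c = ':' := fun hh => h.1 hh.symm
    simp [pvSplits, hcne, ih h.2, pvPrep]

theorem pv_head_of_eq_cons {α : Type} {l : List α} {d : α} {tl : List α}
    (h : l = d :: tl) (hne : l ≠ []) : l.head hne = d := by subst h; rfl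

theorem pop_concat {α : Type} (xs : List α) (a : α) :
    PySem.List.pop? (xs ++ [a]) = some (a, xs) := by
  simp [PySem.List.pop?, PySem.List.pyIdx?]
  induction xs with
  | nil => simp
  | cons x t ih => simpa [List.eraseIdx] using ih

theorem foldl_app (parts : List (List Char)) : ∀ (acc : List Char),
    parts.foldl (fun title t => title ++ t ++ ['_']) acc = acc ++ parts.flatMap (fun t => t ++ ['_']) := by
  induction parts with
  | nil => intro acc; simp
  | cons p r ih => intro acc; simp [List.flatMap]

theorem dropLast_flatMap (parts : List (List Char)) :
    (parts.flatMap (fun t => t ++ ['_'])).dropLast = pvJoinU parts := by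
  induction parts with
  | nil => simp [pvJoinU]
  | cons p r ih =>
    cases r with
    | nil => simp [pvJoinU]
    | cons q rs =>
      have hne : ((q :: rs).flatMap (fun t => t ++ ['_'])) ≠ [] := by simp
      rw [List.flatMap_cons, List.dropLast_append_of_ne_nil hne]
      simp only [pvJoinU, ih]
      simp

theorem slice_one_negone (l : List Char) :
    PySem.List.slice l (some 1) (some (-1)) = l.tail.dropLast := by
  cases l with
  | nil => decide
  | cons c t =>
    simp [PySem.List.slice, PySem.List.clampIdx]
    rw [if_neg (by omega), List.dropLast_eq_take]

-- rpartition characterization: colon present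
theorem rpart_spec (s : List Char) :
    (':' ∉ s ∧ pvRPartColon s = ([], s)) ∨
    (∃ head last, s = head ++ ':' :: last ∧ ':' ∉ last ∧ pvRPartColon s = (head, last)) := by
  by_cases hc : ':' ∈ s
  · right
    have hcr : ':' ∈ s.reverse := by simpa using hc
    have hsplit : s.reverse = s.reverse.takeWhile (fun c => c ≠ ':') ++ s.reverse.dropWhile (fun c => c ≠ ':') :=
      (List.takeWhile_append_dropWhile).symm
    have hdne : s.reverse.dropWhile (fun c => c ≠ ':') ≠ [] := by
      intro hnil
      have hmem : ':' ∈ s.reverse.takeWhile (fun c => c ≠ ':') := by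
        rw [hsplit, hnil, List.append_nil] at hcr; exact hcr
      have := List.mem_takeWhile_imp hmem
      simp at this
    obtain ⟨d, tl, hd⟩ := List.exists_cons_of_ne_nil hdne
    have hdcol : d = ':' := by
      have hh := List.head_dropWhile_not (l := s.reverse) (p := fun c => decide (c ≠ ':')) hdne
      rw [pv_head_of_eq_cons hd hdne] at hh
      simpa using hh
    set lastRev := s.reverse.takeWhile (fun c => c ≠ ':') with hlr
    have hs : s = tl.reverse ++ ':' :: lastRev.reverse := by
      have : s.reverse = lastRev ++ ':' :: tl := by rw [hsplit, hd, hdcol]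
      calc s = s.reverse.reverse := by simp
        _ = (lastRev ++ ':' :: tl).reverse := by rw [this]
        _ = tl.reverse ++ ':' :: lastRev.reverse := by simp
    refine ⟨tl.reverse, lastRev.reverse, hs, ?_, ?_⟩
    · intro hmem
      have : (':' : Char) ∈ lastRev := by simpa using hmem
      have := List.mem_takeWhile_imp this
      simp at this
    · have hlen : s.length = tl.length + 1 + lastRev.length := by
        rw [hs]; simp; omega
      unfold pvRPartColon
      rw [← hlr]
      rw [if_neg (by omega)]
      have htake : s.take (s.length - lastRev.length - 1) = tl.reverse := by
        rw [hs, List.take_append_of_le_length (by simp; omega)]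
        have hlen2 : (tl.reverse ++ ':' :: lastRev.reverse).length - lastRev.length - 1
            = tl.reverse.length := by simp; omega
        rw [hlen2, List.take_length]
      rw [htake]
  · left
    refine ⟨hc, ?_⟩
    have : s.reverse.takeWhile (fun c => c ≠ ':') = s.reverse := by
      rw [List.takeWhile_eq_self_iff]
      intro a ha
      simp only [List.mem_reverse] at ha
      simp only [decide_eq_true_eq]
      intro h; exact hc (h ▸ ha)
    unfold pvRPartColon
    rw [this, if_pos (by simp)]

-- ===== VERDICT (by name: the statement is the Claim_ definition above) =====
theorem chars_slices_eq (last : List Char) :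
    PySem.Chars.slice (PySem.Chars.slice last (some 1) none) none (some (-1))
      = PySem.Chars.slice last (some 1) (some (-1)) := by
  simp only [PySem.Chars.slice_eq_listSlice, PySem.List.slice_from_one,
    PySem.List.slice_to_neg_one, slice_one_negone]

theorem get_canvas_id_and_title_spec : Claim_equal_get_canvas_id_and_title := by
  intro val _
  unfold Spec_get_canvas_id_and_title get_canvas_id_and_title get_canvas_id_and_title_alt
  rcases rpart_spec val.toList with ⟨hnc, hrp⟩ | ⟨head, last, hs, hnl, hrp⟩
  · simp only [hrp, splitOn_eq, splits_no_colon _ hnc]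
    rw [show ([val.toList] : List (List Char)) = [] ++ [val.toList] by simp, pop_concat]
    simp only [List.foldl_nil, replace_eq, List.map_nil, chars_slices_eq]
    simp [PySem.Chars.slice_eq_listSlice, PySem.List.slice_to_neg_one]
  · simp only [splitOn_eq, hrp]
    rw [hs]
    simp only [splits_append_colon, splits_no_colon _ hnl, pop_concat]
    simp only [foldl_app, List.nil_append,
      PySem.Chars.slice_eq_listSlice, PySem.List.slice_to_neg_one,
      PySem.List.slice_from_one, slice_one_negone,
      dropLast_flatMap, replace_eq, map_sub_eq_joinU]
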